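-- pv_equiv track=rewrite | github.com/aminovolimboy077-create/gashir-bot | bot.py | is_supported_link
-- ===== SOURCE A (Python) =====
-- def is_supported_link(text: str) -> bool:
--     sites = (
--         "youtube.com",
--         "youtu.be",
--         "instagram.com",
--         "facebook.com",
--         "fb.watch",
--         "tiktok.com",
--     )
--     return any(site in text for site in sites)
-- ===== SOURCE B (Python) =====
-- def is_supported_link(text: str) -> bool:
--     sites = (
--         "youtube.com",
--         "youtu.be",
--         "instagram.com",
--         "facebook.com",
--         "fb.watch",
--         "tiktok.com",
--     )
--     # single left-to-right pass over the positions of text: at each position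
--     # ask whether any site name begins there, instead of six independent scans
--     for i in range(len(text)):
--         for site in sites:
--             if text.startswith(site, i):
--                 return True
--     return False
-- ===== Notes on version B (the rewrite author's own statement) =====
-- stated objective: alternative
-- what changed: B makes one left-to-right pass over the positions of text, testing at each position whether any of the six site names starts there, instead of A's six independent full substring scans ('site in text' per site).
import Mathlib
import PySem

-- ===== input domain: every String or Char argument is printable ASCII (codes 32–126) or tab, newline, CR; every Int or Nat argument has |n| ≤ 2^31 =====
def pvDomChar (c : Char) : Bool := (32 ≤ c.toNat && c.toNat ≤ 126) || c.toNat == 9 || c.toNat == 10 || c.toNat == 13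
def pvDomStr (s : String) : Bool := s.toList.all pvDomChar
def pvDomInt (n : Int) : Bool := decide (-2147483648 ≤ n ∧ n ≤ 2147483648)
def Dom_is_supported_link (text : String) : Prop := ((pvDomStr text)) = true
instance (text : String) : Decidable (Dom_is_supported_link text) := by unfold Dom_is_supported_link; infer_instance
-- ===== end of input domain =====

-- B makes one pass over the positions of text, testing at each position whether a
-- site name starts there, instead of A's six independent substring scans.

-- the tuple of supported sites, shared verbatim by both Pythons
def pvSites : List String :=
  ["youtube.com", "youtu.be", "instagram.com", "facebook.com", "fb.watch", "tiktok.com"]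

-- ===== PORT A =====
-- any(site in text for site in sites)
def is_supported_link (text : String) : Bool :=
  pvSites.any (fun site => PySem.Str.isIn site text)

-- ===== PORT B =====
-- for i in range(len(text)): for site in sites: if text.startswith(site, i): return True
-- text.startswith(site, i) is ported by hand as a prefix test on the i-th suffix
-- (exact for the 0 ≤ i < len(text) produced by range(len(text)))
def is_supported_link_alt (text : String) : Bool :=
  (PySem.List.pyRange 0 (text.toList.length : Int) 1).any (fun i =>
    pvSites.any (fun site =>
      PySem.Chars.startswith (text.toList.drop i.toNat) site.toList))

-- ===== PRECONDITION & SPEC =====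
def Spec_is_supported_link (text : String) (out : Bool) : Prop := out = is_supported_link_alt text
instance (text : String) (out : Bool) : Decidable (Spec_is_supported_link text out) := by unfold Spec_is_supported_link; infer_instance

-- ===== CLAIM (what is proved, stated in full; the proofs are below) =====
def Claim_equal_is_supported_link : Prop := ∀ (text : String), Dom_is_supported_link text → Spec_is_supported_link text (is_supported_link text)

-- ===== LEMMAS AND PROOFS =====

-- every site in the list is a nonempty string
theorem pvSites_ne_nil : ∀ site ∈ pvSites, site.toList ≠ [] := by decide

-- ===== VERDICT (by name: the statement is the Claim_ definition above) =====
theorem is_supported_link_spec : Claim_equal_is_supported_link := by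
  intro text _
  unfold Spec_is_supported_link is_supported_link is_supported_link_alt
  simp only [PySem.Str.isIn_eq]
  rw [Bool.eq_iff_iff]
  simp only [List.any_eq_true]
  constructor
  · rintro ⟨site, hsite, hin⟩
    obtain ⟨j, hpref⟩ := (PySem.Chars.exists_prefix_drop_iff_isIn site.toList text.toList).mpr hin
    have hne := pvSites_ne_nil site hsite
    have hjlt : j < text.toList.length := by
      by_contra h
      rw [List.drop_eq_nil_of_le (by omega)] at hpref
      exact hne (List.prefix_nil.mp hpref)
    refine ⟨(j : Int), PySem.List.mem_pyRange_one.mpr ⟨Int.natCast_nonneg j, by exact_mod_cast hjlt⟩,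
      site, hsite, ?_⟩
    exact (PySem.Chars.startswith_iff _ _).mpr (by simpa using hpref)
  · rintro ⟨i, hi, site, hsite, hsw⟩
    obtain ⟨h0, _⟩ := PySem.List.mem_pyRange_one.mp hi
    exact ⟨site, hsite,
      (PySem.Chars.exists_prefix_drop_iff_isIn site.toList text.toList).mp
        ⟨i.toNat, (PySem.Chars.startswith_iff _ _).mp hsw⟩⟩
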